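-- pv_equiv track=rewrite | github.com/rbrn1999/leetcode-sol | problems/2505. Bitwise OR of All Subsequence Sums.py | subsequenceSumOr
-- ===== SOURCE A (Python) =====
-- def subsequenceSumOr(nums: list[int]) -> int:
--     result = 0
--     prefix_sum = 0
--     for num in nums:
--         prefix_sum += num
--         result |= num
--         result |= prefix_sum
--
--     return result
-- ===== SOURCE B (Python) =====
-- def subsequenceSumOr(nums: list[int]) -> int:
--     # Divide and conquer: each segment yields (OR of its elements and of the
--     # absolute prefix sums ending inside it given the sum 'base' of everything
--     # before it, segment sum); halves are combined by offsetting the right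
--     # half's prefixes with the left half's sum.
--     def go(seg, base):
--         if len(seg) == 1:
--             x = seg[0]
--             return (x | (base + x), x)
--         mid = len(seg) // 2
--         left_or, left_sum = go(seg[:mid], base)
--         right_or, right_sum = go(seg[mid:], base + left_sum)
--         return (left_or | right_or, left_sum + right_sum)
--     if not nums:
--         return 0
--     return go(nums, 0)[0]
-- ===== Notes on version B (the rewrite author's own statement) =====
-- stated objective: alternative
-- what changed: A's linear left-to-right scan (running prefix sum, OR-ing as it goes) is replaced by a divide-and-conquer algorithm: split the array in half, recursively compute (OR contribution, segment sum) for each half, and combine by offsetting the right half's prefix sums with the left half's total.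
import Mathlib
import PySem

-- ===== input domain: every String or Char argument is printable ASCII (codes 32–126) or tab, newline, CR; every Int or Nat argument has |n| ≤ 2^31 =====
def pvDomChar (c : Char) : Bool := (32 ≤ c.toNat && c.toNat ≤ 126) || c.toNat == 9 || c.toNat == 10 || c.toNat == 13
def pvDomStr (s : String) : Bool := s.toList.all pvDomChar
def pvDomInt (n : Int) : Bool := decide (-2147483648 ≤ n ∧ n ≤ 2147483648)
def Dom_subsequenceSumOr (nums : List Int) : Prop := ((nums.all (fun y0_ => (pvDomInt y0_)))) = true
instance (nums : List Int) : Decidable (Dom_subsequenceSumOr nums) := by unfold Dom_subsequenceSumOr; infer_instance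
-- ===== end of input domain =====

-- B replaces A's linear scan with a divide-and-conquer combine on (OR, segment sum); alternative, same result.


-- ===== PORT A =====
-- state (result, prefix_sum); body: prefix_sum += num; result |= num; result |= prefix_sum
def subsequenceSumOr (nums : List Int) : Int :=
  (nums.foldl (fun (st : Int × Int) num =>
      (Int.lor (Int.lor st.1 num) (st.2 + num), st.2 + num)) (0, 0)).1

-- ===== PORT B =====
-- go(seg, base): (OR of seg's elements and of the absolute prefix sums inside seg given
-- the sum 'base' of everything before it, sum of seg). seg[:mid]/seg[mid:] with
-- 0 ≤ mid ≤ len(seg) are exactly List.take/List.drop. The [] branch is a totality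
-- guard only: Source B never calls go on an empty segment.
def pvGo (seg : List Int) (base : Int) : Int × Int :=
  match seg with
  | [] => (0, 0)
  | [x] => (Int.lor x (base + x), x)
  | a :: b :: rest =>
    let seg' := a :: b :: rest
    let mid := seg'.length / 2
    let l := pvGo (seg'.take mid) base
    let r := pvGo (seg'.drop mid) (base + l.2)
    (Int.lor l.1 r.1, l.2 + r.2)
termination_by seg.length
decreasing_by
  · simp [List.length_take]; omega
  · simp [List.length_drop]; omega

def subsequenceSumOr_alt (nums : List Int) : Int :=
  match nums with
  | [] => 0
  | _ => (pvGo nums 0).1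

-- ===== PRECONDITION & SPEC =====
def Spec_subsequenceSumOr (nums : List Int) (out : Int) : Prop := out = subsequenceSumOr_alt nums
instance (nums : List Int) (out : Int) : Decidable (Spec_subsequenceSumOr nums out) := by unfold Spec_subsequenceSumOr; infer_instance

-- ===== CLAIM (what is proved, stated in full; the proofs are below) =====
def Claim_equal_subsequenceSumOr : Prop := ∀ (nums : List Int), Dom_subsequenceSumOr nums → Spec_subsequenceSumOr nums (subsequenceSumOr nums)

-- ===== LEMMAS AND PROOFS =====

-- extensionality of Int by test bits; then OR is commutative/associative and 0 is neutral
theorem intTestBitExt (m n : Int) (h : ∀ k, m.testBit k = n.testBit k) : m = n := by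
  cases m with
  | ofNat a =>
    cases n with
    | ofNat b =>
      congr 1
      apply Nat.eq_of_testBit_eq
      intro k; simpa [Int.testBit] using h k
    | negSucc b =>
      exfalso
      have hk := h (a + b)
      have ha : a < 2 ^ (a + b) :=
        lt_of_le_of_lt (Nat.le_add_right a b) (Nat.lt_two_pow_self)
      have hb : b < 2 ^ (a + b) :=
        lt_of_le_of_lt (Nat.le_add_left b a) (Nat.lt_two_pow_self)
      simp [Int.testBit, Nat.testBit_eq_false_of_lt ha, Nat.testBit_eq_false_of_lt hb] at hk
  | negSucc a =>
    cases n with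
    | ofNat b =>
      exfalso
      have hk := h (a + b)
      have ha : a < 2 ^ (a + b) :=
        lt_of_le_of_lt (Nat.le_add_right a b) (Nat.lt_two_pow_self)
      have hb : b < 2 ^ (a + b) :=
        lt_of_le_of_lt (Nat.le_add_left b a) (Nat.lt_two_pow_self)
      simp [Int.testBit, Nat.testBit_eq_false_of_lt ha, Nat.testBit_eq_false_of_lt hb] at hk
    | negSucc b =>
      congr 1
      apply Nat.eq_of_testBit_eq
      intro k
      simpa [Int.testBit] using h k

theorem intLorAssoc (a b c : Int) : (a.lor b).lor c = a.lor (b.lor c) := by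
  apply intTestBitExt; intro k; simp [Int.testBit_lor, Bool.or_assoc]

theorem intLorZero (a : Int) : a.lor 0 = a := by
  cases a <;> simp [Int.lor] <;>
    (apply Nat.eq_of_testBit_eq; intro k; simp [Nat.testBit_ldiff])

theorem intZeroLor (a : Int) : Int.lor 0 a = a := by
  cases a <;> simp [Int.lor] <;>
    (apply Nat.eq_of_testBit_eq; intro k; simp [Nat.testBit_ldiff])

-- reference value: OR of the elements of l and of the prefix sums of l offset by base
def refOr (base : Int) : List Int → Int
  | [] => 0
  | n :: ns => Int.lor (Int.lor n (base + n)) (refOr (base + n) ns)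

theorem refOr_append (l r : List Int) (base : Int) :
    refOr base (l ++ r) = Int.lor (refOr base l) (refOr (base + l.sum) r) := by
  induction l generalizing base with
  | nil => simp [refOr, intZeroLor]
  | cons n ns ih =>
      simp only [List.cons_append, refOr, List.sum_cons, ih, intLorAssoc]
      ring_nf

theorem pvGo_eq (fuel : Nat) : ∀ (seg : List Int) (base : Int),
    seg.length ≤ fuel → seg ≠ [] → pvGo seg base = (refOr base seg, seg.sum) := by
  induction fuel with
  | zero => intro seg base h hne; cases seg with
      | nil => exact absurd rfl hne
      | cons a t => simp at h
  | succ f ih =>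
    intro seg base hlen hne
    match seg with
    | [] => exact absurd rfl hne
    | [x] => simp [pvGo, refOr, intLorZero]
    | a :: b :: rest =>
      rw [pvGo]
      have hlen2 : (a :: b :: rest).length = rest.length + 2 := by simp
      set s := a :: b :: rest with hs
      have hmid1 : 1 ≤ s.length / 2 := by rw [hlen2]; omega
      have hmid2 : s.length / 2 < s.length := by rw [hlen2]; omega
      have htake : (s.take (s.length / 2)).length = s.length / 2 := by
        simp [List.length_take]; omega
      have hdrop : (s.drop (s.length / 2)).length = s.length - s.length / 2 := by
        simp [List.length_drop]
      have htne : s.take (s.length / 2) ≠ [] := by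
        intro h; rw [h] at htake; simp at htake; omega
      have hdne : s.drop (s.length / 2) ≠ [] := by
        intro h; rw [h] at hdrop; simp at hdrop; omega
      have hsf : s.length ≤ f + 1 := hlen
      rw [ih (s.take (s.length / 2)) base (by rw [htake]; omega) htne,
          ih (s.drop (s.length / 2)) _ (by rw [hdrop]; omega) hdne]
      have hsplit : s = s.take (s.length / 2) ++ s.drop (s.length / 2) :=
        (List.take_append_drop _ _).symm
      simp only [Prod.mk.injEq]
      refine ⟨?_, ?_⟩
      · conv_rhs => rw [hsplit]
        rw [refOr_append]
      · conv_rhs => rw [hsplit]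
        simp

-- A's loop, started from (r, p), computes r OR refOr p nums
theorem main_loop (nums : List Int) (r p : Int) :
    (nums.foldl (fun (st : Int × Int) num =>
      (Int.lor (Int.lor st.1 num) (st.2 + num), st.2 + num)) (r, p)).1 =
    Int.lor r (refOr p nums) := by
  induction nums generalizing r p with
  | nil => simp [refOr, intLorZero]
  | cons n ns ih =>
      simp only [List.foldl, refOr]
      rw [ih]; simp only [intLorAssoc]

-- ===== VERDICT (by name: the statement is the Claim_ definition above) =====
theorem subsequenceSumOr_spec : Claim_equal_subsequenceSumOr := by
  intro nums _
  unfold Spec_subsequenceSumOr subsequenceSumOr subsequenceSumOr_alt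
  rw [main_loop, intZeroLor]
  match nums with
  | [] => rfl
  | a :: t =>
      rw [pvGo_eq (a :: t).length (a :: t) 0 le_rfl (by simp)]
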